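-- pv_equiv track=rewrite | github.com/bosscharlie/Combinatorics | LatticePathsWithBarrier/python/LatticePaths.py | IEP
-- ===== SOURCE A (Python) =====
-- import math
-- from itertools import combinations
--
-- def IEP(m, n, barrier_input):
--     '''容斥原理求解
--     Args:
--         m,n(int) : 格路终点坐标
--         barriers_input(list) : 有障碍的路径列表,共k行(k为障碍数量),每行四个int(x1,y1,x2,x2)表示(x1,y1)与(x2,y2)间的路径不能通过
--
--     Returns:
--         result(int) : 有障碍的格路问题方案数
--     '''
--     barrier_input.sort(key=lambda x: (x[0], x[1]))  # 对障碍路径坐标进行排序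
--     barriers = []  # 有障碍的路径列表
--     for barrier in barrier_input:
--         x1, y1, x2, y2 = barrier
--         barriers.append((int(min(x1, x2)), int(min(y1, y2)), int(
--             max(x1, x2)), int(max(y1, y2))))  # 按路径起点坐标-终点坐标的方式存储一条路径
--     full_paths = math.comb(m+n, n)
--     result = full_paths  # 无约束条件下的路径方案数
--     for i in range(1, len(barriers)+1):  # 求一定经过k条障碍的路径数
--         for comb in combinations(barriers, i):  # 选择k条障碍可能的组合
--             sub_result = math.comb(
--                 comb[0][0]+comb[0][1], comb[0][1])  # 起点到第一条障碍路径起点的方案数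
--             for k in range(1, len(comb)):
--                 if comb[k][0] >= comb[k-1][2] and comb[k][1] >= comb[k-1][3]:
--                     # 上一条障碍终点到下一条障碍起点间的路径方案数
--                     sub_result = sub_result * \
--                         math.comb(comb[k][0]-comb[k-1][2]+comb[k]
--                                   [1]-comb[k-1][3], comb[k][1]-comb[k-1][3])
--                 else:
--                     sub_result = 0
--             sub_result = sub_result * \
--                 math.comb(m-comb[-1][2]+n-comb[-1][3], n -
--                           comb[-1][3])  # 最后一条障碍结束到终点间的方案数
--             result = result+((-1)**i)*sub_result  # 根据容斥原理中的系数累加求得结果方案数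
--     return result
-- ===== SOURCE B (Python) =====
-- import math
--
-- def IEP(m, n, barrier_input):
--     # Signed DP over barriers sorted by start point: g[j] sums, over all chains of
--     # barriers ending at barrier j, the signed count of paths from the origin through
--     # the chain; O(k^2) instead of A's O(2^k * k) subset enumeration.
--     # (A sorts barrier_input in place; B leaves it unchanged — return values agree.)
--     bs = [(min(x1, x2), min(y1, y2), max(x1, x2), max(y1, y2))
--           for x1, y1, x2, y2 in sorted(barrier_input, key=lambda x: (x[0], x[1]))]
--     total = math.comb(m + n, n)
--     g = []
--     for j, (x1, y1, x2, y2) in enumerate(bs):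
--         v = -math.comb(x1 + y1, y1)
--         for i in range(j):
--             px1, py1, px2, py2 = bs[i]
--             if x1 >= px2 and y1 >= py2:
--                 v -= g[i] * math.comb(x1 - px2 + y1 - py2, y1 - py2)
--         g.append(v)
--         total += v * math.comb(m - x2 + n - y2, n - y2)
--     return total
-- ===== Notes on version B (the rewrite author's own statement) =====
-- stated objective: faster
-- what changed: Replaces A's inclusion-exclusion enumeration of all 2^k barrier subsets by a signed dynamic program over the sorted barriers (g[j] accumulates signed path counts of chains ending at barrier j), computing the same alternating sum in O(k^2) products.
import Mathlib
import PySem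

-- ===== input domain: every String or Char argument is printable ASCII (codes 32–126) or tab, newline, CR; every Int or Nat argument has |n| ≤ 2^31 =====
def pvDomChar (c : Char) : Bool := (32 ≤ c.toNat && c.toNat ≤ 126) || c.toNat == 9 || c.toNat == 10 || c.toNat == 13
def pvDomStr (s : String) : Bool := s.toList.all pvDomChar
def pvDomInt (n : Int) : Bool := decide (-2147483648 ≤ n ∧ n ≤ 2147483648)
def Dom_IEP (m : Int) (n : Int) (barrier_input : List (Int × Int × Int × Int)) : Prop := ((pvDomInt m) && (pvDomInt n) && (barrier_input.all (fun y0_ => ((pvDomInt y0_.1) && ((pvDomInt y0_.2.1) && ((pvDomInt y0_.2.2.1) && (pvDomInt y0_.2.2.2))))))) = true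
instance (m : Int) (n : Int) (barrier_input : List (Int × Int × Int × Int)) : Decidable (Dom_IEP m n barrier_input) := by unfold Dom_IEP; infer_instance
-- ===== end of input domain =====

-- B replaces A's enumeration of all 2^k barrier subsets by a signed chain DP over the
-- sorted barriers (O(k^2) comb products); return values agree on Pre_ (A additionally
-- sorts barrier_input in place, B does not mutate it — the claim is about the return value).

-- math.comb a b (total stand-in: both Pythons raise ValueError on a negative argument,
-- which Pre_IEP excludes; there it returns 0, never reached inside Pre_)
def pycomb (a b : Int) : Int := if 0 ≤ a ∧ 0 ≤ b then ((a.toNat.choose b.toNat : Nat) : Int) else 0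

-- (min(x1,x2), min(y1,y2), max(x1,x2), max(y1,y2)) of a barrier (x1,y1,x2,y2)
def normBar (b : Int × Int × Int × Int) : Int × Int × Int × Int :=
  (min b.1 b.2.2.1, min b.2.1 b.2.2.2, max b.1 b.2.2.1, max b.2.1 b.2.2.2)

-- ===== PORT A =====
def IEP (m : Int) (n : Int) (barrier_input : List (Int × Int × Int × Int)) : Int :=
  let srt := PySem.List.sorted2 barrier_input (fun x => x.1) (fun x => x.2.1)
  let barriers := srt.foldl (fun acc b => acc ++ [normBar b]) []
  let full_paths := pycomb (m + n) n
  (List.range barriers.length).foldl (fun result i =>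
    (PySem.List.combinations barriers (i+1)).foldl (fun result c =>
      match c with
      | [] => result
      | c0 :: rest =>
        let sub := (rest.foldl (fun (st : (Int × Int × Int × Int) × Int) ck =>
            (ck, if st.1.2.2.1 ≤ ck.1 ∧ st.1.2.2.2 ≤ ck.2.1 then
                   st.2 * pycomb (ck.1 - st.1.2.2.1 + (ck.2.1 - st.1.2.2.2)) (ck.2.1 - st.1.2.2.2)
                 else 0))
            (c0, pycomb (c0.1 + c0.2.1) c0.2.1)).2
        let lst := rest.getLastD c0
        result + (-1 : Int)^(i+1) *
          (sub * pycomb (m - lst.2.2.1 + (n - lst.2.2.2)) (n - lst.2.2.2))) result)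
    full_paths

-- ===== PORT B =====
-- one iteration of B's DP loop: st = (g-table paired with its barriers, running total)
def stepB (m : Int) (n : Int) (st : List ((Int × Int × Int × Int) × Int) × Int)
    (b : Int × Int × Int × Int) : List ((Int × Int × Int × Int) × Int) × Int :=
  let v := st.1.foldl (fun acc p =>
      if p.1.2.2.1 ≤ b.1 ∧ p.1.2.2.2 ≤ b.2.1 then
        acc - p.2 * pycomb (b.1 - p.1.2.2.1 + (b.2.1 - p.1.2.2.2)) (b.2.1 - p.1.2.2.2)
      else acc)
    (-(pycomb (b.1 + b.2.1) b.2.1))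
  (st.1 ++ [(b, v)], st.2 + v * pycomb (m - b.2.2.1 + (n - b.2.2.2)) (n - b.2.2.2))

def IEP_alt (m : Int) (n : Int) (barrier_input : List (Int × Int × Int × Int)) : Int :=
  let bs := (PySem.List.sorted2 barrier_input (fun x => x.1) (fun x => x.2.1)).map normBar
  (bs.foldl (stepB m n) ([], pycomb (m + n) n)).2

-- ===== PRECONDITION & SPEC =====
-- Pre_ excludes exactly the inputs on which the Python A raises ValueError (math.comb
-- with a negative argument): n<0, m+n<0, or a barrier whose normalized endpoints leave
-- the rectangle [0,m]×[0,n]; B raises there too.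
def Pre_IEP (m : Int) (n : Int) (barrier_input : List (Int × Int × Int × Int)) : Prop :=
  0 ≤ n ∧ 0 ≤ m + n ∧ ∀ b ∈ barrier_input,
    0 ≤ min b.2.1 b.2.2.2 ∧ 0 ≤ min b.1 b.2.2.1 + min b.2.1 b.2.2.2 ∧
    max b.2.1 b.2.2.2 ≤ n ∧ max b.1 b.2.2.1 + max b.2.1 b.2.2.2 ≤ m + n
instance (m : Int) (n : Int) (barrier_input : List (Int × Int × Int × Int)) : Decidable (Pre_IEP m n barrier_input) := by unfold Pre_IEP; infer_instance

def pvWitness_IEP : Int × Int × (List (Int × Int × Int × Int)) := (2, 2, [(1, 0, 1, 1)])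

def Spec_IEP (m : Int) (n : Int) (barrier_input : List (Int × Int × Int × Int)) (out : Int) : Prop := out = IEP_alt m n barrier_input
instance (m : Int) (n : Int) (barrier_input : List (Int × Int × Int × Int)) (out : Int) : Decidable (Spec_IEP m n barrier_input out) := by unfold Spec_IEP; infer_instance

-- ===== CLAIM (what is proved, stated in full; the proofs are below) =====
def Claim_equal_IEP : Prop := ∀ (m : Int) (n : Int) (barrier_input : List (Int × Int × Int × Int)), Dom_IEP m n barrier_input → Pre_IEP m n barrier_input → Spec_IEP m n barrier_input (IEP m n barrier_input)

-- ===== LEMMAS AND PROOFS =====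

-- proof-side abbreviations: transition weight, endpoint weights, chain machinery
def trW (p b : Int × Int × Int × Int) : Int :=
  if p.2.2.1 ≤ b.1 ∧ p.2.2.2 ≤ b.2.1 then
    pycomb (b.1 - p.2.2.1 + (b.2.1 - p.2.2.2)) (b.2.1 - p.2.2.2)
  else 0
def w0W (b : Int × Int × Int × Int) : Int := pycomb (b.1 + b.2.1) b.2.1
def wendW (m n : Int) (b : Int × Int × Int × Int) : Int :=
  pycomb (m - b.2.2.1 + (n - b.2.2.2)) (n - b.2.2.2)

-- prefix weight of a chain, as A's inner fold computes it
def pwp (c0 : Int × Int × Int × Int) (rest : List (Int × Int × Int × Int)) :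
    (Int × Int × Int × Int) × Int :=
  rest.foldl (fun st ck => (ck, st.2 * trW st.1 ck)) (c0, w0W c0)

def lastW (c : List (Int × Int × Int × Int)) : Int × Int × Int × Int := c.getLastD (0, 0, 0, 0)

def pwL : List (Int × Int × Int × Int) → Int
  | [] => 1
  | c0 :: rest => (pwp c0 rest).2

-- signed prefix weight
def spL (c : List (Int × Int × Int × Int)) : Int := (-1 : Int)^c.length * pwL c

-- full signed weight of a chain
def FW (m n : Int) (c : List (Int × Int × Int × Int)) : Int := spL c * wendW m n (lastW c)

-- all nonempty subsequences (chains)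
def chains : List (Int × Int × Int × Int) → List (List (Int × Int × Int × Int))
  | [] => []
  | x :: xs => [x] :: ((chains xs).map (x :: ·) ++ chains xs)

-- the DP value of a fresh barrier b against a table gp
def vOf (gp : List ((Int × Int × Int × Int) × Int)) (b : Int × Int × Int × Int) : Int :=
  -(w0W b) - (gp.map (fun p => p.2 * trW p.1 b)).sum

-- signed sum over chains inside pre that end (after extension) at b
def chainEnd (pre : List (Int × Int × Int × Int)) (b : Int × Int × Int × Int) : Int :=
  -(w0W b) - ((chains pre).map (fun c => spL c * trW (lastW c) b)).sum

lemma sum_map_add {α : Type} (l : List α) (g h : α → Int) :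
    (l.map (fun x => g x + h x)).sum = (l.map g).sum + (l.map h).sum := by
  induction l with
  | nil => simp
  | cons x t ih => simp [ih]; ring

lemma sum_map_mulr {α : Type} (l : List α) (g : α → Int) (k : Int) :
    (l.map (fun x => g x * k)).sum = (l.map g).sum * k := by
  induction l with
  | nil => simp
  | cons x t ih => simp [ih]; ring

lemma sum_map_neg {α : Type} (l : List α) (g : α → Int) :
    (l.map (fun x => -(g x))).sum = -((l.map g).sum) := by
  induction l with
  | nil => simp
  | cons x t ih => simp [ih]; ring

lemma getLastD_cons' {α : Type} (x c0 : α) (t : List α) :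
    (x :: t).getLastD c0 = t.getLastD x := List.getLastD_cons

lemma getLastD_concat {α : Type} (d b : α) (l : List α) :
    (l ++ [b]).getLastD d = b := by
  induction l generalizing d with
  | nil => rfl
  | cons a l ih => rw [List.cons_append, getLastD_cons', ih]

lemma foldl_sub {α : Type} (l : List α) (g : α → Int) (a : Int) :
    l.foldl (fun acc x => acc - g x) a = a - (l.map g).sum := by
  induction l generalizing a with
  | nil => simp
  | cons x t ih => simp [List.foldl_cons, ih]; ring

lemma foldl_pair_fst {α β : Type} (g : α × β → α → β) :
    ∀ (rest : List α) (c0 : α) (s : β),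
    (rest.foldl (fun st ck => (ck, g st ck)) (c0, s)).1 = rest.getLastD c0 := by
  intro rest
  induction rest with
  | nil => intro c0 s; simp
  | cons x t ih =>
    intro c0 s
    rw [List.foldl_cons, ih, getLastD_cons']

lemma pwp_snoc (c0 x : Int × Int × Int × Int) (rest : List (Int × Int × Int × Int)) :
    (pwp c0 (rest ++ [x])).2 = (pwp c0 rest).2 * trW (rest.getLastD c0) x := by
  unfold pwp
  rw [List.foldl_append]
  simp [foldl_pair_fst (g := fun st ck => st.2 * trW st.1 ck)]

lemma spL_single (b : Int × Int × Int × Int) : spL [b] = -(w0W b) := by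
  simp [spL, pwL, pwp]

lemma lastW_cons (c0 : Int × Int × Int × Int) (rest : List (Int × Int × Int × Int)) :
    lastW (c0 :: rest) = rest.getLastD c0 := by
  unfold lastW
  rw [getLastD_cons']

lemma lastW_snoc (c : List (Int × Int × Int × Int)) (b : Int × Int × Int × Int) :
    lastW (c ++ [b]) = b := by
  unfold lastW
  rw [getLastD_concat]

lemma lastW_single (b : Int × Int × Int × Int) : lastW [b] = b := by
  unfold lastW
  rfl

lemma spL_snoc (c0 x : Int × Int × Int × Int) (rest : List (Int × Int × Int × Int)) :
    spL ((c0 :: rest) ++ [x]) = -(spL (c0 :: rest) * trW (lastW (c0 :: rest)) x) := by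
  simp only [spL, List.cons_append, pwL, pwp_snoc, lastW_cons, List.length_cons,
    List.length_append, List.length_cons, List.length_nil]
  ring_nf

lemma chains_ne (xs : List (Int × Int × Int × Int)) :
    ∀ c ∈ chains xs, c ≠ [] := by
  induction xs with
  | nil => intro c hc; simp [chains] at hc
  | cons x t ih =>
    intro c hc
    simp only [chains, List.mem_cons, List.mem_append, List.mem_map] at hc
    rcases hc with h | ⟨d, _, rfl⟩ | h
    · subst h; simp
    · simp
    · exact ih c h

lemma chains_snoc_sum (xs : List (Int × Int × Int × Int)) :
    ∀ (f : List (Int × Int × Int × Int) → Int) (b : Int × Int × Int × Int),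
    ((chains (xs ++ [b])).map f).sum
      = ((chains xs).map f).sum + f [b] + ((chains xs).map (fun c => f (c ++ [b]))).sum := by
  induction xs with
  | nil => intro f b; simp [chains]
  | cons x t ih =>
    intro f b
    simp only [List.cons_append, chains, List.map_cons, List.map_append, List.map_map,
      List.sum_cons, List.sum_append, Function.comp_def]
    rw [ih (fun c => f (x :: c)) b, ih f b]
    simp only [List.nil_append]
    ring

lemma chainEnd_snoc (pre : List (Int × Int × Int × Int)) (b b' : Int × Int × Int × Int) :
    chainEnd (pre ++ [b]) b' = chainEnd pre b' - chainEnd pre b * trW b b' := by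
  unfold chainEnd
  rw [chains_snoc_sum pre (fun c => spL c * trW (lastW c) b') b]
  have hmap : (chains pre).map (fun c => spL (c ++ [b]) * trW (lastW (c ++ [b])) b')
      = (chains pre).map (fun c => (-(spL c * trW (lastW c) b)) * trW b b') := by
    apply List.map_congr_left
    intro c hc
    rcases List.exists_cons_of_ne_nil (chains_ne pre c hc) with ⟨c0, rest, rfl⟩
    rw [spL_snoc, lastW_snoc]
  rw [hmap]
  simp only [neg_mul]
  rw [sum_map_neg (g := fun c => spL c * trW (lastW c) b * trW b b'),
    sum_map_mulr (g := fun c => spL c * trW (lastW c) b)]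
  rw [spL_single, lastW_single]
  ring

lemma chainEnd_wend (pre : List (Int × Int × Int × Int)) (b : Int × Int × Int × Int)
    (m n : Int) :
    ((chains (pre ++ [b])).map (FW m n)).sum
      = ((chains pre).map (FW m n)).sum + chainEnd pre b * wendW m n b := by
  rw [chains_snoc_sum pre (FW m n) b]
  have hmap : (chains pre).map (fun c => FW m n (c ++ [b]))
      = (chains pre).map (fun c => (-(spL c * trW (lastW c) b)) * wendW m n b) := by
    apply List.map_congr_left
    intro c hc
    rcases List.exists_cons_of_ne_nil (chains_ne pre c hc) with ⟨c0, rest, rfl⟩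
    unfold FW
    rw [spL_snoc, lastW_snoc]
  rw [hmap]
  simp only [neg_mul]
  rw [sum_map_neg (g := fun c => spL c * trW (lastW c) b * wendW m n b),
    sum_map_mulr (g := fun c => spL c * trW (lastW c) b)]
  unfold FW chainEnd
  rw [spL_single, lastW_single]
  ring

-- B's inner fold computes vOf
lemma stepB_v (gp : List ((Int × Int × Int × Int) × Int)) (b : Int × Int × Int × Int) :
    gp.foldl (fun acc p =>
      if p.1.2.2.1 ≤ b.1 ∧ p.1.2.2.2 ≤ b.2.1 then
        acc - p.2 * pycomb (b.1 - p.1.2.2.1 + (b.2.1 - p.1.2.2.2)) (b.2.1 - p.1.2.2.2)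
      else acc)
    (-(pycomb (b.1 + b.2.1) b.2.1)) = vOf gp b := by
  have hfun : (fun (acc : Int) (p : (Int × Int × Int × Int) × Int) =>
      if p.1.2.2.1 ≤ b.1 ∧ p.1.2.2.2 ≤ b.2.1 then
        acc - p.2 * pycomb (b.1 - p.1.2.2.1 + (b.2.1 - p.1.2.2.2)) (b.2.1 - p.1.2.2.2)
      else acc)
      = (fun acc p => acc - p.2 * trW p.1 b) := by
    funext acc p
    unfold trW
    split_ifs <;> simp
  rw [hfun, foldl_sub]
  unfold vOf w0W
  ring_nf

lemma vOf_append (gp : List ((Int × Int × Int × Int) × Int)) (b : Int × Int × Int × Int)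
    (v : Int) (b' : Int × Int × Int × Int) :
    vOf (gp ++ [(b, v)]) b' = vOf gp b' - v * trW b b' := by
  unfold vOf
  simp
  ring

-- main invariant lemma for B's fold
lemma B_fold (m n : Int) :
    ∀ (l : List (Int × Int × Int × Int)) (gp : List ((Int × Int × Int × Int) × Int))
      (t : Int) (pre : List (Int × Int × Int × Int)),
    (∀ b, vOf gp b = chainEnd pre b) →
    (l.foldl (stepB m n) (gp, t)).2
      = t + ((chains (pre ++ l)).map (FW m n)).sum - ((chains pre).map (FW m n)).sum := by
  intro l
  induction l with
  | nil => intro gp t pre _; simp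
  | cons b r ih =>
    intro gp t pre hinv
    rw [List.foldl_cons]
    have hst : stepB m n (gp, t) b
        = (gp ++ [(b, chainEnd pre b)], t + chainEnd pre b * wendW m n b) := by
      unfold stepB
      simp only
      rw [stepB_v, hinv b]
      unfold wendW
      rfl
    rw [hst]
    have hinv' : ∀ b', vOf (gp ++ [(b, chainEnd pre b)]) b' = chainEnd (pre ++ [b]) b' := by
      intro b'
      rw [vOf_append, hinv b', chainEnd_snoc]
    rw [ih _ _ _ hinv']
    rw [chainEnd_wend pre b m n]
    have : pre ++ [b] ++ r = pre ++ (b :: r) := by simp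
    rw [this]
    ring

-- A's subset sums over combinations collapse to one sum over all chains
lemma combos_sum :
    ∀ (xs : List (Int × Int × Int × Int)) (N : Nat)
      (f : List (Int × Int × Int × Int) → Int), xs.length ≤ N →
    ((List.range N).map (fun i => ((PySem.List.combinations xs (i+1)).map f).sum)).sum
      = ((chains xs).map f).sum := by
  intro xs
  induction xs with
  | nil =>
    intro N f _
    simp [PySem.List.combinations_nil_succ, chains]
  | cons x t ih =>
    intro N f hN
    obtain ⟨M, rfl⟩ : ∃ M, N = M + 1 := by
      cases N with
      | zero => simp at hN
      | succ M => exact ⟨M, rfl⟩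
    have hlen : t.length ≤ M := by simpa using hN
    have hsplit : ∀ i : Nat,
        ((PySem.List.combinations (x :: t) (i+1)).map f).sum
          = ((PySem.List.combinations t i).map (fun c => f (x :: c))).sum
            + ((PySem.List.combinations t (i+1)).map f).sum := by
      intro i
      rw [PySem.List.combinations_cons_succ]
      simp [Function.comp_def]
    calc ((List.range (M+1)).map (fun i => ((PySem.List.combinations (x :: t) (i+1)).map f).sum)).sum
        = ((List.range (M+1)).map (fun i =>
            ((PySem.List.combinations t i).map (fun c => f (x :: c))).sum
              + ((PySem.List.combinations t (i+1)).map f).sum)).sum := by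
          congr 1
          exact List.map_congr_left (fun i _ => hsplit i)
      _ = ((List.range (M+1)).map (fun i =>
            ((PySem.List.combinations t i).map (fun c => f (x :: c))).sum)).sum
            + ((List.range (M+1)).map (fun i =>
            ((PySem.List.combinations t (i+1)).map f).sum)).sum := by
          rw [sum_map_add]
      _ = (f [x] + ((chains t).map (fun c => f (x :: c))).sum) + ((chains t).map f).sum := by
          congr 1
          · rw [List.range_succ_eq_map]
            simp only [List.map_cons, List.map_map, List.sum_cons]
            rw [PySem.List.combinations_zero]
            congr 1
            · simp
            · have : (List.range M).map ((fun i => ((PySem.List.combinations t i).map (fun c => f (x :: c))).sum) ∘ Nat.succ)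
                  = (List.range M).map (fun i => ((PySem.List.combinations t (i+1)).map (fun c => f (x :: c))).sum) := by
                simp [Function.comp]
              rw [this, ih M (fun c => f (x :: c)) hlen]
          · exact ih (M+1) f (Nat.le_succ_of_le hlen)
      _ = ((chains (x :: t)).map f).sum := by
          simp [chains, Function.comp_def]
          ring

-- per-chain value of A's inner loop body
lemma A_term (m n : Int) (i : Nat) (c : List (Int × Int × Int × Int))
    (hlen : c.length = i + 1) :
    (match c with
      | [] => (0 : Int)
      | c0 :: rest =>
        (-1 : Int)^(i+1) *
          ((rest.foldl (fun (st : (Int × Int × Int × Int) × Int) ck =>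
            (ck, if st.1.2.2.1 ≤ ck.1 ∧ st.1.2.2.2 ≤ ck.2.1 then
                   st.2 * pycomb (ck.1 - st.1.2.2.1 + (ck.2.1 - st.1.2.2.2)) (ck.2.1 - st.1.2.2.2)
                 else 0))
            (c0, pycomb (c0.1 + c0.2.1) c0.2.1)).2
            * pycomb (m - (rest.getLastD c0).2.2.1 + (n - (rest.getLastD c0).2.2.2)) (n - (rest.getLastD c0).2.2.2)))
      = FW m n c := by
  match c with
  | [] => simp at hlen
  | c0 :: rest =>
    simp only
    have hfun : (fun (st : (Int × Int × Int × Int) × Int) ck =>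
        (ck, if st.1.2.2.1 ≤ ck.1 ∧ st.1.2.2.2 ≤ ck.2.1 then
               st.2 * pycomb (ck.1 - st.1.2.2.1 + (ck.2.1 - st.1.2.2.2)) (ck.2.1 - st.1.2.2.2)
             else 0))
        = (fun (st : (Int × Int × Int × Int) × Int) ck => (ck, st.2 * trW st.1 ck)) := by
      funext st ck
      unfold trW
      split_ifs <;> simp
    rw [hfun]
    unfold FW spL pwL pwp wendW w0W lastW
    rw [List.getLastD_cons]
    have : (c0 :: rest).length = i + 1 := hlen
    simp at this
    subst this
    simp only [List.length_cons, pow_succ]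
    ring

-- the core equivalence on arbitrary inputs
lemma IEP_core (m n : Int) (barrier_input : List (Int × Int × Int × Int)) :
    IEP m n barrier_input = IEP_alt m n barrier_input := by
  unfold IEP IEP_alt
  simp only
  rw [PySem.List.foldl_append_singleton_eq_map]
  simp only [List.nil_append]
  set bs := (PySem.List.sorted2 barrier_input (fun x => x.1) (fun x => x.2.1)).map normBar with hbs
  -- B side
  have hB : (bs.foldl (stepB m n) ([], pycomb (m + n) n)).2
      = pycomb (m + n) n + ((chains bs).map (FW m n)).sum := by
    have := B_fold m n bs [] (pycomb (m + n) n) []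
      (by intro b; simp [vOf, chainEnd, chains])
    simpa [chains] using this
  rw [hB]
  -- A side: rewrite the nested folds into sums
  have hinner : ∀ (i : Nat) (res : Int),
      (PySem.List.combinations bs (i+1)).foldl (fun result c =>
        match c with
        | [] => result
        | c0 :: rest =>
          let sub := (rest.foldl (fun (st : (Int × Int × Int × Int) × Int) ck =>
              (ck, if st.1.2.2.1 ≤ ck.1 ∧ st.1.2.2.2 ≤ ck.2.1 then
                     st.2 * pycomb (ck.1 - st.1.2.2.1 + (ck.2.1 - st.1.2.2.2)) (ck.2.1 - st.1.2.2.2)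
                   else 0))
              (c0, pycomb (c0.1 + c0.2.1) c0.2.1)).2
          let lst := rest.getLastD c0
          result + (-1 : Int)^(i+1) *
            (sub * pycomb (m - lst.2.2.1 + (n - lst.2.2.2)) (n - lst.2.2.2))) res
      = res + ((PySem.List.combinations bs (i+1)).map (FW m n)).sum := by
    intro i res
    have hcongr : ∀ (res : Int), (PySem.List.combinations bs (i+1)).foldl (fun result c =>
        match c with
        | [] => result
        | c0 :: rest =>
          let sub := (rest.foldl (fun (st : (Int × Int × Int × Int) × Int) ck =>
              (ck, if st.1.2.2.1 ≤ ck.1 ∧ st.1.2.2.2 ≤ ck.2.1 then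
                     st.2 * pycomb (ck.1 - st.1.2.2.1 + (ck.2.1 - st.1.2.2.2)) (ck.2.1 - st.1.2.2.2)
                   else 0))
              (c0, pycomb (c0.1 + c0.2.1) c0.2.1)).2
          let lst := rest.getLastD c0
          result + (-1 : Int)^(i+1) *
            (sub * pycomb (m - lst.2.2.1 + (n - lst.2.2.2)) (n - lst.2.2.2))) res
        = (PySem.List.combinations bs (i+1)).foldl (fun result c => result + FW m n c) res := by
      intro res
      apply PySem.List.foldl_congr_mem
      intro acc c hc
      have hlen : c.length = i + 1 := PySem.List.length_of_mem_combinations hc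
      have := A_term m n i c hlen
      match c with
      | [] => simp at hlen
      | c0 :: rest =>
        simp only at this ⊢
        rw [← this]
    rw [hcongr, PySem.List.foldl_add]
  have houter : (List.range bs.length).foldl (fun result i =>
      (PySem.List.combinations bs (i+1)).foldl (fun result c =>
        match c with
        | [] => result
        | c0 :: rest =>
          let sub := (rest.foldl (fun (st : (Int × Int × Int × Int) × Int) ck =>
              (ck, if st.1.2.2.1 ≤ ck.1 ∧ st.1.2.2.2 ≤ ck.2.1 then
                     st.2 * pycomb (ck.1 - st.1.2.2.1 + (ck.2.1 - st.1.2.2.2)) (ck.2.1 - st.1.2.2.2)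
                   else 0))
              (c0, pycomb (c0.1 + c0.2.1) c0.2.1)).2
          let lst := rest.getLastD c0
          result + (-1 : Int)^(i+1) *
            (sub * pycomb (m - lst.2.2.1 + (n - lst.2.2.2)) (n - lst.2.2.2))) result)
      (pycomb (m + n) n)
      = pycomb (m + n) n
        + ((List.range bs.length).map (fun i => ((PySem.List.combinations bs (i+1)).map (FW m n)).sum)).sum := by
    have hc : ∀ res : Int, (List.range bs.length).foldl (fun result i =>
        (PySem.List.combinations bs (i+1)).foldl (fun result c =>
          match c with
          | [] => result
          | c0 :: rest =>
            let sub := (rest.foldl (fun (st : (Int × Int × Int × Int) × Int) ck =>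
                (ck, if st.1.2.2.1 ≤ ck.1 ∧ st.1.2.2.2 ≤ ck.2.1 then
                       st.2 * pycomb (ck.1 - st.1.2.2.1 + (ck.2.1 - st.1.2.2.2)) (ck.2.1 - st.1.2.2.2)
                     else 0))
                (c0, pycomb (c0.1 + c0.2.1) c0.2.1)).2
            let lst := rest.getLastD c0
            result + (-1 : Int)^(i+1) *
              (sub * pycomb (m - lst.2.2.1 + (n - lst.2.2.2)) (n - lst.2.2.2))) result) res
        = (List.range bs.length).foldl (fun result i =>
            result + ((PySem.List.combinations bs (i+1)).map (FW m n)).sum) res := by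
      intro res
      apply PySem.List.foldl_congr_mem
      intro acc i _
      exact hinner i acc
    rw [hc, PySem.List.foldl_add]
  rw [houter, combos_sum bs bs.length (FW m n) (le_refl _)]

-- ===== VERDICT (by name: the statement is the Claim_ definition above) =====
theorem IEP_spec : Claim_equal_IEP := by
  intro m n barrier_input _ _
  unfold Spec_IEP
  exact IEP_core m n barrier_input
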